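-- pv_equiv track=rewrite | github.com/JaliparthiSravanthi/Python | 4009-bitwise-or-of-even-numbers-in-an-array/bitwise-or-of-even-numbers-in-an-array.py | evenNumberBitwiseORs
-- ===== SOURCE A (Python) =====
-- def evenNumberBitwiseORs(nums):
--    lst=[]
--    for i in nums:
--     if  i%2==0:
--         lst.append(i)
--    if len(lst)==0:
--     return 0
--    s=lst[0]
--    for i in range(1,len(lst)):
--     s=s|lst[i]
--    return s
-- ===== SOURCE B (Python) =====
-- def evenNumberBitwiseORs(nums):
--     # Divide and conquer: OR of the even numbers in each half, combined with |.
--     # Correct because | is associative and commutative with identity 0.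
--     if len(nums) == 0:
--         return 0
--     if len(nums) == 1:
--         x = nums[0]
--         return x if x % 2 == 0 else 0
--     mid = len(nums) // 2
--     return evenNumberBitwiseORs(nums[:mid]) | evenNumberBitwiseORs(nums[mid:])
-- ===== Notes on version B (the rewrite author's own statement) =====
-- stated objective: alternative
-- what changed: Replaces A's two staged passes (filter evens into a list, then OR it up by index with an empty guard) with a divide-and-conquer recursion that splits the list in halves and ORs the two recursive results, relying on associativity/commutativity of | with identity 0.
import Mathlib
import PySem

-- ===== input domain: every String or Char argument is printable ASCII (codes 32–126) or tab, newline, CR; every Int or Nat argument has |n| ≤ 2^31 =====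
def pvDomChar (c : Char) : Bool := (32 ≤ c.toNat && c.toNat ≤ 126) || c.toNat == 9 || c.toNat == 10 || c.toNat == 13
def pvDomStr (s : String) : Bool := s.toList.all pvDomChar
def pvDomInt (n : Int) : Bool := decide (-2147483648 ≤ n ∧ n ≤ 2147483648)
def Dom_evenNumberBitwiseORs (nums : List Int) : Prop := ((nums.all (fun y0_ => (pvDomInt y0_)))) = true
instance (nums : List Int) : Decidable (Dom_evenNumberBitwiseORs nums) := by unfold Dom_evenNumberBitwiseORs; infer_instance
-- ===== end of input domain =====

-- B replaces A's two staged passes (filter into a list, then OR by index with an empty guard)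
-- with a divide-and-conquer recursion on halves of the list (alternative decomposition; return value only).

-- ===== PORT A =====
def evenNumberBitwiseORs (nums : List Int) : Int :=
  let lst := nums.foldl (fun l i => if PySem.Int.mod i 2 = 0 then l ++ [i] else l) []
  if lst.length = 0 then 0
  else
    (PySem.List.pyRange 1 (lst.length : Int) 1).foldl
      (fun s i => PySem.Int.bor s (PySem.List.pyGetD lst i 0))
      (PySem.List.pyGetD lst 0 0)

-- ===== PORT B =====
-- len(nums) // 2 on the (nonnegative) length is exact as Nat division.
def evenNumberBitwiseORs_alt (nums : List Int) : Int :=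
  if _h0 : nums.length = 0 then 0
  else if _h1 : nums.length = 1 then
    let x := PySem.List.pyGetD nums 0 0
    if PySem.Int.mod x 2 = 0 then x else 0
  else
    let mid : Nat := nums.length / 2
    PySem.Int.bor
      (evenNumberBitwiseORs_alt (PySem.List.slice nums none (some (mid : Int))))
      (evenNumberBitwiseORs_alt (PySem.List.slice nums (some (mid : Int)) none))
termination_by nums.length
decreasing_by
  · rw [PySem.List.slice_to_natCast]
    simp only [List.length_take]
    omega
  · rw [PySem.List.slice_from_natCast]
    simp only [List.length_drop]
    omega

-- ===== PRECONDITION & SPEC =====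
def Spec_evenNumberBitwiseORs (nums : List Int) (out : Int) : Prop := out = evenNumberBitwiseORs_alt nums
instance (nums : List Int) (out : Int) : Decidable (Spec_evenNumberBitwiseORs nums out) := by unfold Spec_evenNumberBitwiseORs; infer_instance

-- ===== CLAIM (what is proved, stated in full; the proofs are below) =====
def Claim_equal_evenNumberBitwiseORs : Prop := ∀ (nums : List Int), Dom_evenNumberBitwiseORs nums → Spec_evenNumberBitwiseORs nums (evenNumberBitwiseORs nums)

-- ===== LEMMAS AND PROOFS =====

-- the even elements of a list, and the OR-fold from 0: the common value both ports compute
def pvEvens (l : List Int) : List Int := l.filter (fun i => decide (PySem.Int.mod i 2 = 0))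
def pvF (l : List Int) : Int := l.foldl PySem.Int.bor 0

-- n - (n &&& m) (how PySem.Int.bor renders a mixed-sign OR) is Nat.ldiff n m
theorem pv_sub_and (n : Nat) : ∀ m : Nat, n - (n &&& m) = Nat.ldiff n m := by
  induction n using Nat.binaryRec with
  | zero => intro m; simp [Nat.ldiff]
  | bit b n ih =>
    intro m
    obtain ⟨b', m', rfl⟩ : ∃ b' m', Nat.bit b' m' = m := ⟨m.bodd, m.div2, Nat.bit_bodd_div2 m⟩
    rw [Nat.ldiff_bit, Nat.land_bit]
    have h2 := ih m'
    have h3 : n &&& m' ≤ n := Nat.and_le_left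
    cases b <;> cases b' <;> simp [Nat.bit] at * <;> omega

theorem pv_bor_eq_lor (a b : Int) : PySem.Int.bor a b = Int.lor a b := by
  cases a <;> cases b <;>
    simp [PySem.Int.bor, Int.lor, Int.negSucc_eq, pv_sub_and] <;>
    (split_ifs <;> omega)

theorem pv_lor_assoc (a b c : Int) : Int.lor (Int.lor a b) c = Int.lor a (Int.lor b c) := by
  cases a <;> cases b <;> cases c <;>
    simp only [Int.lor] <;>
    (congr 1) <;>
    (apply Nat.eq_of_testBit_eq; intro k;
     simp [Nat.testBit_ldiff, Nat.testBit_or, Nat.testBit_and]) <;>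
    (cases h : Nat.testBit _ k <;> simp [Bool.and_comm])

theorem pv_bor_assoc (a b c : Int) :
    PySem.Int.bor (PySem.Int.bor a b) c = PySem.Int.bor a (PySem.Int.bor b c) := by
  simp [pv_bor_eq_lor, pv_lor_assoc]

theorem pv_bor_zero_left (a : Int) : PySem.Int.bor 0 a = a := by
  rw [PySem.Int.bor_comm]; simp

theorem pv_foldl_bor_acc (l : List Int) : ∀ a : Int, l.foldl PySem.Int.bor a = PySem.Int.bor a (pvF l) := by
  induction l with
  | nil => intro a; simp [pvF]
  | cons x xs ih =>
    intro a
    simp only [List.foldl, pvF]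
    rw [ih (PySem.Int.bor a x), ih (PySem.Int.bor 0 x), pv_bor_zero_left, pv_bor_assoc]

theorem pvF_append (l1 l2 : List Int) : pvF (l1 ++ l2) = PySem.Int.bor (pvF l1) (pvF l2) := by
  unfold pvF
  rw [List.foldl_append, pv_foldl_bor_acc]
  rfl

theorem pvEvens_append (l1 l2 : List Int) : pvEvens (l1 ++ l2) = pvEvens l1 ++ pvEvens l2 := by
  simp [pvEvens]

-- A computes the OR-fold from 0 of the even elements.
theorem pv_A_eq (nums : List Int) : evenNumberBitwiseORs nums = pvF (pvEvens nums) := by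
  unfold evenNumberBitwiseORs
  rw [PySem.List.foldl_append_ite_eq_filter]
  simp only [List.nil_append]
  cases h : nums.filter (fun i => decide (PySem.Int.mod i 2 = 0)) with
  | nil =>
    unfold pvF pvEvens
    rw [h]
    simp
  | cons x xs =>
    rw [if_neg (by simp)]
    rw [show ((x :: xs).length : Int) = PySem.List.len (x :: xs) from rfl,
        PySem.List.foldl_pyRange_pyGetD (x :: xs) 0 PySem.Int.bor
          (PySem.List.pyGetD (x :: xs) 0 0) (a := 1) (by omega)]
    simp only [pvEvens, h, pvF, List.foldl, PySem.List.pyGetD_zero_cons]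
    rw [pv_bor_zero_left]
    simp

-- B computes the same value, by strong induction following its recursion.
theorem pv_B_eq (nums : List Int) : evenNumberBitwiseORs_alt nums = pvF (pvEvens nums) := by
  induction nums using evenNumberBitwiseORs_alt.induct with
  | case1 nums h0 =>
    rw [List.length_eq_zero_iff] at h0
    subst h0
    simp [evenNumberBitwiseORs_alt, pvEvens, pvF]
  | case2 nums h0 h1 xg hx =>
    obtain ⟨x, rfl⟩ := List.length_eq_one_iff.mp h1
    rw [evenNumberBitwiseORs_alt]
    unfold pvEvens pvF
    have hxg : xg = x := by
      show PySem.List.pyGetD [x] 0 0 = x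
      simp [PySem.List.pyGetD_zero_cons]
    rw [hxg] at hx
    have hx' : (2 : Int) ∣ x := by simpa using hx
    simp [hx', pv_bor_zero_left]
  | case3 nums h0 h1 xg hx =>
    obtain ⟨x, rfl⟩ := List.length_eq_one_iff.mp h1
    rw [evenNumberBitwiseORs_alt]
    unfold pvEvens pvF
    have hxg : xg = x := by
      show PySem.List.pyGetD [x] 0 0 = x
      simp [PySem.List.pyGetD_zero_cons]
    rw [hxg] at hx
    have hx' : ¬ (2 : Int) ∣ x := by simpa using hx
    simp [hx']
  | case4 nums h0 h1 mid ih1 ih2 =>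
    rw [evenNumberBitwiseORs_alt]
    simp only [dif_neg h0, dif_neg h1]
    rw [ih1, ih2, PySem.List.slice_to_natCast, PySem.List.slice_from_natCast]
    rw [← pvF_append, ← pvEvens_append, List.take_append_drop]

theorem evenNumberBitwiseORs_spec : Claim_equal_evenNumberBitwiseORs := by
  intro nums _
  unfold Spec_evenNumberBitwiseORs
  rw [pv_A_eq, pv_B_eq]
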